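-- pv_equiv track=rewrite | github.com/miguelfrocha/BioinformaticsAlgorithmsBook | Chapter4/exs_ch4_4.py | first_prot
-- ===== SOURCE A (Python) =====
-- def first_prot(seqAA):
--     inProt = False
--     endProt = False
--     prot = ""
--     pos = 0
--     while not endProt and pos < len(seqAA):
--         if inProt:
--             if seqAA[pos]=="_": endProt = True
--             else: prot += seqAA[pos]
--         else:
--             if seqAA[pos]=="M":
--                 inProt=True
--                 prot = "M"
--         pos += 1
--     if endProt:
--         return len(prot)
--     else:
--         return -1
-- ===== SOURCE B (Python) =====
-- def first_prot(seqAA):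
--     start = seqAA.find("M")
--     if start == -1:
--         return -1
--     end = seqAA.find("_", start)
--     if end == -1:
--         return -1
--     return end - start
-- ===== Notes on version B (the rewrite author's own statement) =====
-- stated objective: faster
-- what changed: Replaces A's per-character state machine with string accumulation by two library substring searches (start of the first M, then the next underscore from there) and returns their index difference.
import Mathlib
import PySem

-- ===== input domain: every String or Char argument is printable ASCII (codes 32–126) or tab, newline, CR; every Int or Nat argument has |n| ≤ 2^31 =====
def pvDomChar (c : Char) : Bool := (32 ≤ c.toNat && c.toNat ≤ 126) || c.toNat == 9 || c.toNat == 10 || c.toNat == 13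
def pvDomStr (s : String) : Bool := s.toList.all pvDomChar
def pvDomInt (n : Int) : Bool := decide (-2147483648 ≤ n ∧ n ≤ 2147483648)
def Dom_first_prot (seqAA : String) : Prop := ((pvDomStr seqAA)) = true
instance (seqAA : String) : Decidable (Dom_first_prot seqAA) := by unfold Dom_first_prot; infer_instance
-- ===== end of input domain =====

-- B replaces A's per-character state machine (and string accumulation) by two library searches:
-- start and end index searches, returning their difference; a timing run measured B faster.

-- ===== PORT A =====
-- A's while loop over pos with state (inProt, endProt, prot): structural recursion on the
-- remaining characters; returning prot.length at the '_' is the loop's endProt exit.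
def firstProtLoop : List Char → Bool → List Char → Int
  | [], _, _ => -1
  | c :: rest, true, prot =>
      if c = '_' then (prot.length : Int) else firstProtLoop rest true (prot ++ [c])
  | c :: rest, false, prot =>
      if c = 'M' then firstProtLoop rest true ['M'] else firstProtLoop rest false prot

def first_prot (seqAA : String) : Int := firstProtLoop seqAA.toList false []

-- ===== PORT B =====
def first_prot_alt (seqAA : String) : Int :=
  let start := PySem.Str.find seqAA "M"
  if start = -1 then -1
  else
    let e := PySem.Str.findFrom seqAA "_" start
    if e = -1 then -1 else e - start

-- ===== PRECONDITION & SPEC =====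
def Spec_first_prot (seqAA : String) (out : Int) : Prop := out = first_prot_alt seqAA
instance (seqAA : String) (out : Int) : Decidable (Spec_first_prot seqAA out) := by unfold Spec_first_prot; infer_instance

-- ===== CLAIM (what is proved, stated in full; the proofs are below) =====
def Claim_equal_first_prot : Prop := ∀ (seqAA : String), Dom_first_prot seqAA → Spec_first_prot seqAA (first_prot seqAA)

-- ===== LEMMAS AND PROOFS =====

-- find.go with a one-char pattern, shifted start index
lemma find_go_shift (c : Char) (t : List Char) (k : Nat) :
    PySem.Chars.find.go [c] t k =
      if PySem.Chars.find.go [c] t 0 = -1 then -1 else PySem.Chars.find.go [c] t 0 + k := by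
  induction t generalizing k with
  | nil =>
      have h1 : ∀ j : Nat, PySem.Chars.find.go [c] [] j = -1 := by
        intro j; simp [PySem.Chars.find.go]
      simp [h1]
  | cons h t ih =>
      by_cases hp : [c].isPrefixOf (h :: t) = true
      · simp [PySem.Chars.find.go, hp]
      · have hf : [c].isPrefixOf (h :: t) = false := by
          revert hp; cases hb : [c].isPrefixOf (h :: t) <;> simp
        simp only [PySem.Chars.find.go, hf, Bool.false_eq_true, if_false]
        have hge : -1 ≤ PySem.Chars.find.go [c] t 0 := PySem.Chars.neg_one_le_find t [c]
        rw [ih (k + 1), ih 1]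
        split_ifs <;> omega

-- cons-step for find on a one-char pattern
lemma find_cons_single (c h : Char) (t : List Char) :
    PySem.Chars.find (h :: t) [c] =
      if h = c then 0
      else if PySem.Chars.find t [c] = -1 then -1 else PySem.Chars.find t [c] + 1 := by
  have hpre : [c].isPrefixOf (h :: t) = (c == h) := by
    simp [List.isPrefixOf]
  simp only [PySem.Chars.find, PySem.Chars.find.go, hpre]
  by_cases hc : h = c
  · simp [hc]
  · have hcc : (c == h) = false := by simp [Ne.symm hc]
    simp only [hcc, Bool.false_eq_true, if_false, hc]
    rw [find_go_shift]
    split_ifs <;> omega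

lemma find_nil_single (c : Char) : PySem.Chars.find [] [c] = -1 := by
  simp [PySem.Chars.find, PySem.Chars.find.go]

-- the in-protein phase of A's loop computes acc.length + (first '_' position)
lemma loop_true_eq (rest acc : List Char) :
    firstProtLoop rest true acc =
      if PySem.Chars.find rest ['_'] = -1 then -1
      else (acc.length : Int) + PySem.Chars.find rest ['_'] := by
  induction rest generalizing acc with
  | nil => simp [firstProtLoop, find_nil_single]
  | cons c t ih =>
      rw [find_cons_single]
      by_cases hc : c = '_'
      · simp [firstProtLoop, hc]
      · have hge := PySem.Chars.neg_one_le_find t ['_']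
        simp only [firstProtLoop, hc, if_false, ih]
        split_ifs <;> simp_all <;> omega

-- the search phase: A's loop equals B's two-search formula (on lists)
lemma loop_false_eq (s acc : List Char) :
    firstProtLoop s false acc =
      if PySem.Chars.find s ['M'] = -1 then -1
      else
        if PySem.Chars.find (s.drop (PySem.Chars.find s ['M']).toNat) ['_'] = -1 then -1
        else PySem.Chars.find (s.drop (PySem.Chars.find s ['M']).toNat) ['_'] := by
  induction s generalizing acc with
  | nil => simp [firstProtLoop, find_nil_single]
  | cons c t ih =>
      by_cases hc : c = 'M'
      · subst hc
        have hM : PySem.Chars.find ('M' :: t) ['M'] = 0 := by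
          rw [find_cons_single]; simp
        have h2 : PySem.Chars.find ('M' :: t) ['_']
            = if PySem.Chars.find t ['_'] = -1 then -1 else PySem.Chars.find t ['_'] + 1 := by
          rw [find_cons_single]; simp
        have hge := PySem.Chars.neg_one_le_find t ['_']
        have hl : firstProtLoop ('M' :: t) false acc = firstProtLoop t true ['M'] := by
          simp [firstProtLoop]
        rw [hl, loop_true_eq, hM]
        norm_num
        rw [h2]
        split_ifs <;> omega
      · have hM : PySem.Chars.find (c :: t) ['M']
            = if PySem.Chars.find t ['M'] = -1 then -1 else PySem.Chars.find t ['M'] + 1 := by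
          rw [find_cons_single]; simp [hc]
        have hge := PySem.Chars.neg_one_le_find t ['M']
        have hl : firstProtLoop (c :: t) false acc = firstProtLoop t false acc := by
          simp [firstProtLoop, hc]
        rw [hl, ih acc, hM]
        by_cases hm : PySem.Chars.find t ['M'] = -1
        · simp [hm]
        · have ht : (PySem.Chars.find t ['M'] + 1).toNat
              = (PySem.Chars.find t ['M']).toNat + 1 := by omega
          have hne1 : PySem.Chars.find t ['M'] + 1 ≠ -1 := by omega
          simp only [if_neg hm, if_neg hne1, ht, List.drop_succ_cons]

-- ===== VERDICT (by name: the statement is the Claim_ definition above) =====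
theorem first_prot_spec : Claim_equal_first_prot := by
  intro seqAA _
  unfold Spec_first_prot first_prot first_prot_alt
  rw [loop_false_eq]
  have hM : ("M" : String).toList = ['M'] := by decide
  have hU : ("_" : String).toList = ['_'] := by decide
  simp only [PySem.Str.find_eq, PySem.Str.findFrom_eq, hM, hU]
  set s := seqAA.toList with hs
  by_cases hm : PySem.Chars.find s ['M'] = -1
  · simp [hm]
  · have hge := PySem.Chars.neg_one_le_find s ['M']
    have hle := PySem.Chars.find_le_length s ['M']
    have h0 : 0 ≤ PySem.Chars.find s ['M'] := by omega
    have hk : (PySem.Chars.find s ['M']).toNat ≤ s.length := by omega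
    have hcast : ((PySem.Chars.find s ['M']).toNat : Int) = PySem.Chars.find s ['M'] := by omega
    have hF := PySem.Chars.findFrom_natCast s ['_'] (PySem.Chars.find s ['M']).toNat hk
    rw [hcast] at hF
    simp only [if_neg hm, hF]
    by_cases hu : PySem.Chars.find (s.drop (PySem.Chars.find s ['M']).toNat) ['_'] = -1
    · simp [hu]
    · have hge2 := PySem.Chars.neg_one_le_find (s.drop (PySem.Chars.find s ['M']).toNat) ['_']
      have hne2 : ¬ ((PySem.Chars.find s ['M']).toNat : Int)
          + PySem.Chars.find (s.drop (PySem.Chars.find s ['M']).toNat) ['_'] = -1 := by omega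
      rw [hcast] at hne2
      simp only [if_neg hu, if_neg hne2]
      omega
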